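-- pv_equiv track=rewrite | github.com/NOAA-ORR-ERD/adios_oil_database | web_api/oil_database_api/common/indexing.py | iter_keywords
-- ===== SOURCE A (Python) =====
-- def iter_keywords(str_in):
--     lines = str_in.splitlines()
--     in_tr = False
--     ret = set()
--
--     for l in lines:
--         if in_tr:
--             keyword = l.strip().lower()
--             ret.add(keyword)
--
--         if "keywords" in l or "keyword" in l:
--             in_tr = True
--         else:
--             in_tr = False
--
--     return ', '.join(sorted(ret))
-- ===== SOURCE B (Python) =====
-- def iter_keywords(str_in):
--     lines = str_in.splitlines()
--     found = {cur.strip().lower()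
--              for prev, cur in zip(lines, lines[1:])
--              if "keyword" in prev}
--     return ', '.join(sorted(found))
-- ===== Notes on version B (the rewrite author's own statement) =====
-- stated objective: simpler
-- what changed: Replaces the carried in_tr boolean state threaded through the loop by a stateless set comprehension over adjacent line pairs zip(lines, lines[1:]), collecting a line whenever its predecessor contains the marker substring (whose plural form need not be tested separately since it contains the singular).
import Mathlib
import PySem

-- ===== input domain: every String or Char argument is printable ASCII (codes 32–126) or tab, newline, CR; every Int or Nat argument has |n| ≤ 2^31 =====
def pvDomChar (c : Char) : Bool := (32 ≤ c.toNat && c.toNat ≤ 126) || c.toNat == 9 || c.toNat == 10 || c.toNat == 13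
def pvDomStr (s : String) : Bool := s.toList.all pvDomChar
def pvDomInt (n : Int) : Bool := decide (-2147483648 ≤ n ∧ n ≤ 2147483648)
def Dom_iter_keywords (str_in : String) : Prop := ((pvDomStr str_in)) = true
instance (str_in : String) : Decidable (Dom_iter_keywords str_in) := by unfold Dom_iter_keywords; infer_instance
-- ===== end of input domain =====

-- B replaces A's carried in_tr flag by a stateless pass over adjacent line pairs (simpler decomposition; return value only, no side effects).

-- ===== PORT A =====
def iter_keywords (str_in : String) : String :=
  let lines := PySem.Str.splitlines str_in
  let st := lines.foldl
    (fun (s : Bool × PySem.Set String) l =>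
      let ret := if s.1 then PySem.Set.add s.2 (PySem.Str.lower (PySem.Str.strip l)) else s.2
      let in_tr := PySem.Str.isIn "keywords" l || PySem.Str.isIn "keyword" l
      (in_tr, ret))
    (false, PySem.Set.empty)
  PySem.Str.join ", " (PySem.List.sorted st.2 (fun x => x) false)

-- ===== PORT B =====
def iter_keywords_alt (str_in : String) : String :=
  let lines := PySem.Str.splitlines str_in
  let found : PySem.Set String := PySem.Set.ofList
    (((lines.zip (PySem.List.slice lines (some 1) none)).filter
        (fun p => PySem.Str.isIn "keyword" p.1)).map
      (fun p => PySem.Str.lower (PySem.Str.strip p.2)))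
  PySem.Str.join ", " (PySem.List.sorted found (fun x => x) false)

-- ===== PRECONDITION & SPEC =====
def Spec_iter_keywords (str_in : String) (out : String) : Prop := out = iter_keywords_alt str_in
instance (str_in : String) (out : String) : Decidable (Spec_iter_keywords str_in out) := by unfold Spec_iter_keywords; infer_instance

-- ===== CLAIM (what is proved, stated in full; the proofs are below) =====
def Claim_equal_iter_keywords : Prop := ∀ (str_in : String), Dom_iter_keywords str_in → Spec_iter_keywords str_in (iter_keywords str_in)

-- ===== LEMMAS AND PROOFS =====

-- 'keywords' in l or 'keyword' in l  is just  'keyword' in l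
theorem kw_or (l : String) :
    (PySem.Str.isIn "keywords" l || PySem.Str.isIn "keyword" l) = PySem.Str.isIn "keyword" l := by
  cases h : PySem.Str.isIn "keyword" l with
  | true => simp
  | false =>
    simp only [Bool.or_false]
    simp only [PySem.Str.isIn_eq] at h ⊢
    rw [PySem.Chars.isIn_eq_false_iff] at h ⊢
    intro hs
    exact h (List.IsInfix.trans (l₁ := "keyword".toList) (by decide) hs)

-- the strip-lowered lines A collects, given the incoming flag
def marks (b : Bool) : List String → List String
  | [] => []
  | l :: rest =>
      (if b then [PySem.Str.lower (PySem.Str.strip l)] else []) ++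
        marks (PySem.Str.isIn "keyword" l) rest

theorem foldl_marks (lines : List String) : ∀ (b : Bool) (s : PySem.Set String),
    (lines.foldl
      (fun (s : Bool × PySem.Set String) l =>
        let ret := if s.1 then PySem.Set.add s.2 (PySem.Str.lower (PySem.Str.strip l)) else s.2
        let in_tr := PySem.Str.isIn "keywords" l || PySem.Str.isIn "keyword" l
        (in_tr, ret))
      (b, s)).2 = (marks b lines).foldl PySem.Set.add s := by
  induction lines with
  | nil => intro b s; rfl
  | cons l rest ih =>
    intro b s
    rw [List.foldl_cons]
    refine Eq.trans (ih (PySem.Str.isIn "keywords" l || PySem.Str.isIn "keyword" l)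
      (if b then PySem.Set.add s (PySem.Str.lower (PySem.Str.strip l)) else s)) ?_
    rw [kw_or, marks]
    cases b <;> simp

theorem marks_zip (rest : List String) : ∀ (l : String),
    marks (PySem.Str.isIn "keyword" l) rest =
      (((l :: rest).zip rest).filter (fun p => PySem.Str.isIn "keyword" p.1)).map
        (fun p => PySem.Str.lower (PySem.Str.strip p.2)) := by
  induction rest with
  | nil => intro l; rfl
  | cons r rs ih =>
    intro l
    rw [marks, List.zip_cons_cons, List.filter_cons]
    cases h : PySem.Str.isIn "keyword" l with
    | false =>
      simp only [if_neg (by simp : ¬ (false = true)), List.nil_append]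
      exact ih r
    | true =>
      simp only []
      exact congrArg _ (ih r)

theorem marks_false_eq (lines : List String) :
    marks false lines =
      ((lines.zip lines.tail).filter (fun p => PySem.Str.isIn "keyword" p.1)).map
        (fun p => PySem.Str.lower (PySem.Str.strip p.2)) := by
  cases lines with
  | nil => rfl
  | cons l rest =>
    rw [marks, if_neg (by simp : ¬ (false = true)), List.nil_append, List.tail_cons]
    exact marks_zip rest l

-- ===== VERDICT (by name: the statement is the Claim_ definition above) =====
theorem iter_keywords_spec : Claim_equal_iter_keywords := by
  intro str_in _
  show iter_keywords str_in = iter_keywords_alt str_in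
  unfold iter_keywords iter_keywords_alt
  simp only [PySem.List.slice_from_one, PySem.Set.ofList_eq_foldl, foldl_marks, marks_false_eq]
  rfl
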